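-- pv_equiv track=rewrite | github.com/nowireless4u/hpe-networking-mcp | src/hpe_networking_mcp/platforms/central/tools/firmware.py | _next_lsr_train
-- ===== SOURCE A (Python) =====
-- from typing import Annotated, Literal
--
-- AOS10_AP_GW_RELEASE_TYPES: dict[str, Literal["LSR", "SSR"]] = {
--     "10.3": "SSR",
--     "10.4": "LSR",
--     "10.5": "SSR",
--     "10.6": "SSR",
--     "10.7": "SSR",
--     "10.8": "LSR",
-- }
--
-- def _next_lsr_train(current_train: str | None) -> str | None:
--     """Return the next LSR train at or above the current train, or None."""
--     if not current_train:
--         return None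
--     # Sort trains by their minor number (we're inside AOS 10 here)
--     try:
--         current_minor = int(current_train.split(".")[1])
--     except (IndexError, ValueError):
--         return None
--     lsr_trains = sorted(
--         (t for t, rt in AOS10_AP_GW_RELEASE_TYPES.items() if rt == "LSR"),
--         key=lambda t: int(t.split(".")[1]),
--     )
--     for train in lsr_trains:
--         if int(train.split(".")[1]) >= current_minor:
--             return train
--     return None
-- ===== SOURCE B (Python) =====
-- from typing import Literal
--
-- AOS10_AP_GW_RELEASE_TYPES: dict[str, Literal["LSR", "SSR"]] = {
--     "10.3": "SSR",
--     "10.4": "LSR",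
--     "10.5": "SSR",
--     "10.6": "SSR",
--     "10.7": "SSR",
--     "10.8": "LSR",
-- }
--
-- def _next_lsr_train(current_train):
--     """Return the next LSR train at or above the current train, or None."""
--     if not current_train:
--         return None
--     try:
--         current_minor = int(current_train.split(".")[1])
--     except (IndexError, ValueError):
--         return None
--     # single pass: keep the best (lowest-minor) qualifying LSR train seen so far
--     best = None        # (minor, train) or None
--     for t, rt in AOS10_AP_GW_RELEASE_TYPES.items():
--         if rt != "LSR":
--             continue
--         m = int(t.split(".")[1])
--         if m >= current_minor and (best is None or m < best[0]):
--             best = (m, t)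
--     return None if best is None else best[1]
-- ===== Notes on version B (the rewrite author's own statement) =====
-- stated objective: simpler
-- what changed: Replaces A's sort-the-LSR-trains-then-scan loop with a single pass over the table that keeps the lowest-minor qualifying LSR train in an accumulator (no sort, no second scan), keeping the guards identical.
import Mathlib
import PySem

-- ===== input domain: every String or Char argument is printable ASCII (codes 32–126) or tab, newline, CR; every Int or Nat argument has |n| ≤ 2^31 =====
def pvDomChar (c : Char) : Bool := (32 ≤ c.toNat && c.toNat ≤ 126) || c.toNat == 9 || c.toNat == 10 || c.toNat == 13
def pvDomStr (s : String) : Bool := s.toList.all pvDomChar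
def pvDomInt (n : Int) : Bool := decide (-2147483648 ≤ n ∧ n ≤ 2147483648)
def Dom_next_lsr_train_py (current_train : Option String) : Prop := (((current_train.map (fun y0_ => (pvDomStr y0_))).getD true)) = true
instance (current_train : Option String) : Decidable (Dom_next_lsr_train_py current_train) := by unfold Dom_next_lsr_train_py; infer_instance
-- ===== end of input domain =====

-- B replaces A's sort-then-scan over the LSR trains by ONE pass over the table keeping
-- the lowest-minor qualifying LSR train in an accumulator (simpler: no sort, no second
-- scan); guards are identical.

-- ===== PORT A =====
-- the module-level constant dict (insertion order)
def pyReleaseTypes : List (String × String) :=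
  [("10.3","SSR"),("10.4","LSR"),("10.5","SSR"),("10.6","SSR"),("10.7","SSR"),("10.8","LSR")]

-- int(t.split(".")[1]) for the table's trains (A uses it as sort key / in the scan; it
-- never raises on the table entries, so the getD 0 default is never taken there)
def pyMinor (t : String) : Int :=
  ((PySem.List.pyGet? ((PySem.Str.split? t ".").getD []) 1).bind PySem.Int.ofStr?).getD 0

-- the 'for train in lsr_trains: if … return train' loop
def pyScanA : List String → Int → Option String
  | [], _ => none
  | t :: rest, m => if pyMinor t ≥ m then some t else pyScanA rest m

def next_lsr_train_py (current_train : Option String) : Option String :=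
  match current_train with
  | none => none
  | some s =>
    if s = "" then none
    else
      -- try: current_minor = int(current_train.split(".")[1]) except (IndexError, ValueError): return None
      match (PySem.List.pyGet? ((PySem.Str.split? s ".").getD []) 1).bind PySem.Int.ofStr? with
      | none => none
      | some current_minor =>
        let lsr_trains :=
          PySem.List.sorted ((pyReleaseTypes.filter (fun p => p.2 == "LSR")).map (·.1)) pyMinor
        pyScanA lsr_trains current_minor

-- ===== PORT B =====
-- the body of B's single for-loop: fold the table rows into the best (minor, train) so far
def altStep (currentMinor : Int) (best : Option (Int × String)) (row : String × String) :
    Option (Int × String) :=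
  if row.2 ≠ "LSR" then best
  else
    let m := pyMinor row.1   -- B's  m = int(t.split(".")[1])  (same helper as A's key)
    -- 'm >= current_minor and (best is None or m < best[0])'
    if m ≥ currentMinor then
      match best with
      | none => some (m, row.1)
      | some b => if m < b.1 then some (m, row.1) else best
    else best

def next_lsr_train_py_alt (current_train : Option String) : Option String :=
  match current_train with
  | none => none
  | some s =>
    if s = "" then none
    else
      match (PySem.List.pyGet? ((PySem.Str.split? s ".").getD []) 1).bind PySem.Int.ofStr? with
      | none => none
      | some current_minor =>
        match pyReleaseTypes.foldl (altStep current_minor) none with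
        | none => none
        | some b => some b.2

-- ===== PRECONDITION & SPEC =====
def Spec_next_lsr_train_py (current_train : Option String) (out : Option String) : Prop := out = next_lsr_train_py_alt current_train
instance (current_train : Option String) (out : Option String) : Decidable (Spec_next_lsr_train_py current_train out) := by unfold Spec_next_lsr_train_py; infer_instance

-- ===== CLAIM (what is proved, stated in full; the proofs are below) =====
def Claim_equal_next_lsr_train_py : Prop := ∀ (current_train : Option String), Dom_next_lsr_train_py current_train → Spec_next_lsr_train_py current_train (next_lsr_train_py current_train)

-- ===== LEMMAS AND PROOFS =====

-- after current_minor is obtained, the two tails agree for every minor m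
lemma pv_tail_eq (m : Int) :
    pyScanA (PySem.List.sorted ((pyReleaseTypes.filter (fun p => p.2 == "LSR")).map (·.1)) pyMinor) m
      = (match pyReleaseTypes.foldl (altStep m) none with
         | none => none
         | some b => some b.2) := by
  have hsort : PySem.List.sorted ((pyReleaseTypes.filter (fun p => p.2 == "LSR")).map (·.1)) pyMinor
      = ["10.4", "10.8"] := by decide
  have h3 : pyMinor "10.3" = 3 := by decide
  have h4 : pyMinor "10.4" = 4 := by decide
  have h5 : pyMinor "10.5" = 5 := by decide
  have h6 : pyMinor "10.6" = 6 := by decide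
  have h7 : pyMinor "10.7" = 7 := by decide
  have h8 : pyMinor "10.8" = 8 := by decide
  rw [hsort]
  simp only [pyReleaseTypes, List.foldl, altStep, h3, h4, h5, h6, h7, h8]
  by_cases hm4 : m ≤ 4 <;> by_cases hm8 : m ≤ 8 <;>
    simp [pyScanA, h4, h8, hm4, hm8] <;> omega

-- ===== VERDICT (by name: the statement is the Claim_ definition above) =====
theorem next_lsr_train_py_spec : Claim_equal_next_lsr_train_py := by
  intro ct _
  unfold Spec_next_lsr_train_py next_lsr_train_py next_lsr_train_py_alt
  cases ct with
  | none => rfl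
  | some s =>
    by_cases hs : s = ""
    · simp [hs]
    · simp only [hs, if_false]
      cases hmv : (PySem.List.pyGet? ((PySem.Str.split? s ".").getD []) 1).bind PySem.Int.ofStr? with
      | none => rfl
      | some m => exact pv_tail_eq m
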